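-- pv_equiv track=rewrite | github.com/gitgitWi/algo-quizzes--deprecated | Programmers/Lv2-42585.py | solution_1st
-- ===== SOURCE A (Python) =====
-- def solution_1st (arr:str) :
--
-- 	arr = list(arr)
-- 	stack = []
-- 	info = [''] * len(arr)
-- 	for idx, val in enumerate(arr) :
-- 		stack.append(val)
-- 		if stack[-1] == ')' :
-- 			stack.pop()
-- 			stack.pop()
-- 			if arr[idx-1] == '(' :
-- 				info[idx-1], info[idx] = 'l_front', 'l_back'
-- 			else :
-- 				info[idx] = f'height_{len(stack)+1}'
-- 		else :
-- 			info[idx] = f'height_{len(stack)}'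
--
-- 	# print (info)
--
-- 	'''
-- 	['l_front', 'l_back',
--
-- 	'height_1', 'height_2', 'height_3', 'l_front', 'l_back', 'l_front', 'l_back', 'height_3', 'height_3', 'l_front', 'l_back', 'height_3', 'l_front', 'l_back', 'height_2', 'height_1',
--
-- 	'height_1', 'l_front', 'l_back', 'height_1']
-- 	'''
-- 	pdic = dict([ (h, 0) for h in set(info) if 'height' in h ])
-- 	# print (pdic)
--
-- 	stack = []
--
-- 	for i, v in enumerate(info) :
-- 		if 'height' in v :
-- 			if v not in stack :
-- 				stack.append(v)
-- 				pdic[v] += 1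
-- 			else :
-- 				stack.remove(v)
-- 		if v == 'l_back' :
-- 			for h in stack :
-- 				pdic[h] += 1
--
-- 	# print (pdic)
-- 	return sum(pdic.values())
-- ===== SOURCE B (Python) =====
-- def solution_1st(arr):
--     total = 0
--     depth = 0
--     n = len(arr)
--     for i in range(n):
--         c = arr[i]
--         if c == ')':
--             depth -= 1
--             if i > 0 and arr[i - 1] == '(':
--                 total += depth
--         else:
--             depth += 1
--             if not (c == '(' and i + 1 < n and arr[i + 1] == ')'):
--                 total += 1
--     return total
-- ===== Notes on version B (the rewrite author's own statement) =====
-- stated objective: faster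
-- what changed: Replaced the two-phase info-label/stack/dict bookkeeping (which rescans the label stack with 'v not in stack'/'remove' and walks the whole stack at every laser) by a single left-to-right pass that keeps only a depth counter and a running total, adding 1 at each bar opening and the current depth at each laser.
-- outside the precondition, e.g. on solution_1st(')'): A raises IndexError, B returns 0
import Mathlib
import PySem

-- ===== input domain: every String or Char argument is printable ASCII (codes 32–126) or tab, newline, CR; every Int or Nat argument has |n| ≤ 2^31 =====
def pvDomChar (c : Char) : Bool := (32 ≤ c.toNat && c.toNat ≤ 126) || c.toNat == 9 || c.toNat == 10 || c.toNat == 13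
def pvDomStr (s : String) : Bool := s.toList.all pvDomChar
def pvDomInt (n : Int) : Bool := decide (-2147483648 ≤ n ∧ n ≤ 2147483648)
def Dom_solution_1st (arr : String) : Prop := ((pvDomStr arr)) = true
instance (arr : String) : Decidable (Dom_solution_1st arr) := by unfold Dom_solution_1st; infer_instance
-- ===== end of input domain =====

-- ===== PORT A =====
-- B is a single-pass counter rewrite of A's two-phase label/stack/dict bookkeeping (objective: faster).
-- A raises IndexError (pop from empty list) when some prefix holds more ')' than other chars; Pre_ excludes exactly those inputs.

-- string literals used by A, written as explicit char lists (the kernel reduces these)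
def pvHeightCs : List Char := ['h', 'e', 'i', 'g', 'h', 't']
def pvLFront : List Char := ['l', '_', 'f', 'r', 'o', 'n', 't']
def pvLBack : List Char := ['l', '_', 'b', 'a', 'c', 'k']
-- f'height_{k}'
def pvLabel (k : Int) : List Char := ['h', 'e', 'i', 'g', 'h', 't', '_'] ++ PySem.Int.toChars k

-- first loop body; state = none once the 'stack.pop()' IndexError has been raised
def pvA1Step (arrL : List Char) (st : Option (List Char × List (List Char))) (iv : Int × Char) :
    Option (List Char × List (List Char)) :=
  match st with
  | none => none
  | some (stack, info) =>
    let idx := iv.1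
    let val := iv.2
    let stack := stack ++ [val]                                -- stack.append(val)
    if val = ')' then                                          -- stack[-1] == ')'
      match PySem.List.pop? stack (-1) with                    -- stack.pop()  (never fails: just appended)
      | none => none
      | some (_, s1) =>
        match PySem.List.pop? s1 (-1) with                     -- stack.pop()  (IndexError when empty)
        | none => none
        | some (_, s2) =>
          if PySem.List.pyGet? arrL (idx - 1) = some '(' then  -- arr[idx-1] == '('
            -- info[idx-1], info[idx] = 'l_front', 'l_back'    (indices always in range here: pySetD is exact)
            some (s2, PySem.List.pySetD (PySem.List.pySetD info (idx - 1) pvLFront) idx pvLBack)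
          else
            some (s2, PySem.List.pySetD info idx (pvLabel ((s2.length : Int) + 1)))
    else
      some (stack, PySem.List.pySetD info idx (pvLabel (stack.length : Int)))

-- second loop body ('pdic[h] += 1' can never hit a KeyError: pdic's keys are exactly the
-- height labels occurring in info, so Dict.modify with default 0 is exact here)
def pvA2Step (st : List (List Char) × PySem.Dict (List Char) Int) (v : List Char) :
    List (List Char) × PySem.Dict (List Char) Int :=
  let stack := st.1
  let pdic := st.2
  let (stack, pdic) :=
    if PySem.Chars.isIn pvHeightCs v then                      -- 'height' in v
      if ¬ (v ∈ stack) then (stack ++ [v], pdic.modify v 0 (· + 1))   -- append; pdic[v] += 1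
      else (((PySem.List.remove? stack v).getD stack), pdic)   -- stack.remove(v)  (v ∈ stack: exact)
    else (stack, pdic)
  if v = pvLBack then
    (stack, stack.foldl (fun d h => d.modify h 0 (· + 1)) pdic)  -- for h in stack: pdic[h] += 1
  else (stack, pdic)

def solution_1st (arr : String) : Int :=
  let arrL := arr.toList                                       -- arr = list(arr)
  match (PySem.List.enumerate arrL).foldl (pvA1Step arrL)
      (some (([] : List Char), List.replicate arrL.length ([] : List Char))) with
  | none => 0                                                  -- IndexError raised (outside Pre_)
  | some (_, info) =>
    -- pdic = dict([(h, 0) for h in set(info) if 'height' in h])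
    let pdic : PySem.Dict (List Char) Int :=
      PySem.Dict.ofList (((PySem.Set.ofList info).filter
        (fun h => PySem.Chars.isIn pvHeightCs h)).map (fun h => (h, (0 : Int))))
    let res := (PySem.List.enumerate info).foldl (fun st iv => pvA2Step st iv.2) ([], pdic)
    res.2.values.sum                                           -- sum(pdic.values())

-- ===== PORT B =====
def pvBStep (s : List Char) (n : Nat) (td : Int × Int) (i : Int) : Int × Int :=
  let c := PySem.List.pyGetD s i ' '                           -- c = arr[i]
  if c = ')' then
    let d := td.2 - 1
    if 0 < i ∧ PySem.List.pyGetD s (i - 1) ' ' = '(' then (td.1 + d, d) else (td.1, d)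
  else
    let d := td.2 + 1
    if c = '(' ∧ i + 1 < (n : Int) ∧ PySem.List.pyGetD s (i + 1) ' ' = ')' then (td.1, d)
    else (td.1 + 1, d)

def solution_1st_alt (arr : String) : Int :=
  let s := arr.toList
  let n := s.length
  ((PySem.List.pyRange 0 (n : Int)).foldl (pvBStep s n) (0, 0)).1

-- ===== PRECONDITION & SPEC =====
-- Pre_ holds exactly when A returns: A raises IndexError (pop from an empty stack) iff some
-- prefix of arr contains more ')' than other characters.
def Pre_solution_1st (arr : String) : Prop :=
  ∀ i, i ≤ arr.toList.length → 2 * ((arr.toList.take i).count ')') ≤ i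
instance (arr : String) : Decidable (Pre_solution_1st arr) := by
  unfold Pre_solution_1st; infer_instance
def pvWitness_solution_1st : String := "()(((()())(())()))(())"

def Spec_solution_1st (arr : String) (out : Int) : Prop := out = solution_1st_alt arr
instance (arr : String) (out : Int) : Decidable (Spec_solution_1st arr out) := by
  unfold Spec_solution_1st; infer_instance

-- ===== CLAIM (what is proved, stated in full; the proofs are below) =====
def Claim_equal_solution_1st : Prop :=
  ∀ (arr : String), Dom_solution_1st arr → Pre_solution_1st arr →
    Spec_solution_1st arr (solution_1st arr)

-- ===== LEMMAS AND PROOFS =====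

-- decimal digits of n, most significant first (= what Nat.toDigits 10 produces)
def pvDigits (n : Nat) : List Char :=
  if h : n < 10 then [Nat.digitChar n]
  else pvDigits (n / 10) ++ [Nat.digitChar (n % 10)]
  decreasing_by exact Nat.div_lt_self (by omega) (by omega)

def pvParse (l : List Char) : Nat := l.foldl (fun a c => 10 * a + (c.toNat - 48)) 0

lemma pvParse_digitChar (d : Nat) (h : d < 10) : (Nat.digitChar d).toNat - 48 = d := by
  interval_cases d <;> decide

lemma pvParse_pvDigits (n : Nat) : pvParse (pvDigits n) = n := by
  induction n using Nat.strong_induction_on with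
  | _ n ih =>
    rw [pvDigits]
    split
    · next h => simp [pvParse, List.foldl]; exact pvParse_digitChar n h
    · next h =>
      have ih' := ih (n / 10) (Nat.div_lt_self (by omega) (by omega))
      rw [pvParse, List.foldl_append] at *
      simp only [List.foldl]
      rw [ih', pvParse_digitChar (n % 10) (by omega)]
      omega

lemma pvDigits_inj {m n : Nat} (h : pvDigits m = pvDigits n) : m = n := by
  have := pvParse_pvDigits m; rw [h, pvParse_pvDigits] at this; omega

lemma pvToDigitsCore_eq (f : Nat) : ∀ n rest, n < f →
    Nat.toDigitsCore 10 f n rest = pvDigits n ++ rest := by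
  induction f with
  | zero => omega
  | succ f ih =>
    intro n rest hn
    rw [Nat.toDigitsCore, pvDigits]
    by_cases h10 : n < 10
    · have h0 : n / 10 = 0 := Nat.div_eq_of_lt h10
      simp [h0, h10, Nat.mod_eq_of_lt h10]
    · have hd : ¬ n / 10 = 0 := by omega
      rw [if_neg hd, dif_neg h10,
        ih (n / 10) _ (by have := Nat.div_lt_self (show 0 < n by omega) (by omega : 1 < 10); omega)]
      simp

lemma pvToChars_natCast (n : Nat) : PySem.Int.toChars (n : Int) = pvDigits n := by
  rw [PySem.Int.toChars]
  simp [Nat.toDigits]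
  rw [pvToDigitsCore_eq (n + 1) n [] (by omega)]
  simp

def pvLabelN (k : Nat) : List Char := pvLabel (k : Int)

lemma pvLabelN_inj {m n : Nat} (h : pvLabelN m = pvLabelN n) : m = n := by
  rw [pvLabelN, pvLabelN, pvLabel, pvLabel, pvToChars_natCast, pvToChars_natCast] at h
  exact pvDigits_inj (List.append_cancel_left h)

-- the info list A's first loop produces, and B's tally, as structural recursions
def pvInfoSpec (d : Nat) (l : List Char) : List (List Char) :=
  match l with
  | [] => []
  | c :: rest =>
    if c = ')' then pvLabelN d :: pvInfoSpec (d - 1) rest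
    else if c = '(' ∧ rest.head? = some ')' then
      pvLFront :: pvLBack :: pvInfoSpec d rest.tail
    else pvLabelN (d + 1) :: pvInfoSpec (d + 1) rest
  termination_by l.length
  decreasing_by all_goals simp

def pvBCount (d : Nat) (l : List Char) : Int :=
  match l with
  | [] => 0
  | c :: rest =>
    if c = ')' then pvBCount (d - 1) rest
    else if c = '(' ∧ rest.head? = some ')' then (d : Int) + pvBCount d rest.tail
    else 1 + pvBCount (d + 1) rest
  termination_by l.length
  decreasing_by all_goals simp


-- ---- facts about the labels ----
def pvHeights (d : Nat) : List (List Char) := (List.range d).map (fun k => pvLabelN (k + 1))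

lemma pvIsIn_label (k : Nat) : PySem.Chars.isIn pvHeightCs (pvLabelN k) = true := by
  rw [PySem.Chars.isIn_iff_infix]
  exact ⟨[], '_' :: PySem.Int.toChars (k : Int), by simp [pvLabelN, pvLabel, pvHeightCs]⟩

lemma pvIsIn_lfront : PySem.Chars.isIn pvHeightCs pvLFront = false := by decide
lemma pvIsIn_lback : PySem.Chars.isIn pvHeightCs pvLBack = false := by decide

lemma pvLabel_ne_lback (k : Nat) : pvLabelN k ≠ pvLBack := by
  intro h
  rw [pvLabelN, pvLabel, pvLBack] at h
  simp at h

lemma pvLFront_ne_lback : pvLFront ≠ pvLBack := by decide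

lemma pvMem_heights {k d : Nat} : pvLabelN k ∈ pvHeights d ↔ 1 ≤ k ∧ k ≤ d := by
  constructor
  · intro h
    obtain ⟨j, hj, hjk⟩ := List.mem_map.mp h
    have := pvLabelN_inj hjk
    have := List.mem_range.mp hj
    omega
  · intro ⟨h1, h2⟩
    exact List.mem_map.mpr ⟨k - 1, List.mem_range.mpr (by omega), by congr 1; omega⟩

lemma pvHeights_succ (d : Nat) : pvHeights (d + 1) = pvHeights d ++ [pvLabelN (d + 1)] := by
  simp [pvHeights, List.range_succ]

lemma pvRemove_append_singleton {x : List Char} : ∀ (l : List (List Char)), x ∉ l →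
    PySem.List.remove? (l ++ [x]) x = some l := by
  intro l
  induction l with
  | nil => intro _; simp
  | cons a l ih =>
    intro hx
    have ha : a ≠ x := by intro h; exact hx (h ▸ List.mem_cons_self)
    rw [List.cons_append, PySem.List.remove?_cons_of_ne _ ha,
      ih (fun h => hx (List.mem_cons_of_mem _ h))]
    rfl

lemma pvRemove_heights {d : Nat} (hd : 1 ≤ d) :
    PySem.List.remove? (pvHeights d) (pvLabelN d) = some (pvHeights (d - 1)) := by
  have : pvHeights d = pvHeights (d - 1) ++ [pvLabelN d] := by
    have := pvHeights_succ (d - 1)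
    rw [show d - 1 + 1 = d by omega] at this
    exact this
  rw [this]
  exact pvRemove_append_singleton _ (fun h => by have := (pvMem_heights.mp h).2; omega)

-- ---- dict value-sum lemmas ----
lemma pvSum_aux (k : List Char) : ∀ (ps : List (List Char × Int)) (v : Int),
    (ps.map Prod.fst).Nodup → (PySem.Dict.mk ps).get? k = some v →
    ((ps.map (fun p => if p.1 == k then (k, v + 1) else p)).map Prod.snd).sum
      = (ps.map Prod.snd).sum + 1 := by
  intro ps
  induction ps with
  | nil => intro v _ h; simp [PySem.Dict.get?] at h
  | cons p tl ih =>
    intro v hnd hget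
    rw [PySem.Dict.get?_mk_cons] at hget
    by_cases hk : p.1 = k
    · have hbeq : (p.1 == k) = true := by simp [hk]
      simp only [hbeq, if_true] at hget
      have hv : p.2 = v := by injection hget
      have htl : List.map (fun q => if (q.1 == k) = true then (k, v + 1) else q) tl = tl := by
        conv_rhs => rw [← List.map_id tl]
        apply List.map_congr_left
        intro a ha
        have hak : ¬ (a.1 == k) = true := by
          simp only [beq_iff_eq]
          intro hh
          have hnd' : (p.1 :: tl.map Prod.fst).Nodup := by simpa using hnd
          exact (List.nodup_cons.mp hnd').1 (hk ▸ hh ▸ List.mem_map.mpr ⟨a, ha, rfl⟩)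
        simp [hak]
      simp only [List.map_cons, htl, hbeq, if_true, List.sum_cons]
      omega
    · have hbeq : (p.1 == k) = false := by simp [hk]
      simp only [hbeq, Bool.false_eq_true, if_false] at hget
      have hnd' : (tl.map Prod.fst).Nodup := (List.nodup_cons.mp (by simpa using hnd)).2
      have hrec := ih v hnd' hget
      simp only [List.map_cons, List.sum_cons, hbeq, Bool.false_eq_true, if_false]
      omega

def pvND (d : PySem.Dict (List Char) Int) : Prop := (d.items.map Prod.fst).Nodup

lemma pvKeys_map_if (d : PySem.Dict (List Char) Int) (k : List Char) (v : Int) :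
    (d.items.map (fun p => if p.1 == k then (k, v) else p)).map Prod.fst
      = d.items.map Prod.fst := by
  rw [List.map_map]
  apply List.map_congr_left
  intro a _
  by_cases h : a.1 = k
  · simp [h]
  · simp [h]

lemma pvSum_modify (d : PySem.Dict (List Char) Int) (k : List Char) (hnd : pvND d) :
    (d.modify k 0 (· + 1)).values.sum = d.values.sum + 1 ∧ pvND (d.modify k 0 (· + 1)) := by
  rw [PySem.Dict.modify]
  by_cases hc : d.contains k = true
  · obtain ⟨v, hv⟩ : ∃ v, d.get? k = some v := by
      rw [PySem.Dict.contains_eq_isSome_get?] at hc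
      exact Option.isSome_iff_exists.mp hc
    rw [PySem.Dict.getD_of_get?_eq_some d 0 hv]
    have hit := PySem.Dict.items_insert_of_contains d (v + 1) hc
    constructor
    · simp only [PySem.Dict.values, hit]
      exact pvSum_aux k d.items v hnd hv
    · rw [pvND, hit, pvKeys_map_if]
      exact hnd
  · have hc' : d.contains k = false := by simpa using hc
    rw [PySem.Dict.getD_of_not_contains d 0 hc']
    have hit := PySem.Dict.items_insert_of_not_contains d (0 + 1) hc'
    simp only [zero_add] at hit ⊢
    have hk : k ∉ d.items.map Prod.fst := by
      intro ha
      have : d.contains k = true := by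
        rw [PySem.Dict.contains]
        obtain ⟨p, hp, hfst⟩ := List.mem_map.mp ha
        exact List.any_eq_true.mpr ⟨p, hp, by simp [hfst]⟩
      rw [this] at hc'
      cases hc'
    constructor
    · simp [PySem.Dict.values, hit]
    · rw [pvND, hit]  -- nodup keys: append a fresh key
      simp only [List.map_append, List.map_cons, List.map_nil]
      exact hnd.append (List.nodup_singleton _) (List.disjoint_singleton.mpr hk)

lemma pvSum_foldl_modify : ∀ (stack : List (List Char)) (d : PySem.Dict (List Char) Int),
    pvND d →
    (stack.foldl (fun d h => d.modify h 0 (· + 1)) d).values.sum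
        = d.values.sum + stack.length ∧
      pvND (stack.foldl (fun d h => d.modify h 0 (· + 1)) d) := by
  intro stack
  induction stack with
  | nil => intro d hd; simpa using hd
  | cons h tl ih =>
    intro d hd
    obtain ⟨h1, h2⟩ := pvSum_modify d h hd
    obtain ⟨h3, h4⟩ := ih _ h2
    refine ⟨?_, h4⟩
    rw [List.foldl_cons, h3, h1]
    simp only [List.length_cons]
    push_cast
    omega


-- ---- phase 2: the second loop over the info list computes B's tally ----
lemma pvHeights_length (d : Nat) : (pvHeights d).length = d := by simp [pvHeights]

lemma pvA2Step_label_open (d : Nat) (pdic : PySem.Dict (List Char) Int) :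
    pvA2Step (pvHeights d, pdic) (pvLabelN (d + 1))
      = (pvHeights (d + 1), pdic.modify (pvLabelN (d + 1)) 0 (· + 1)) := by
  have hmem : pvLabelN (d + 1) ∉ pvHeights d := fun h => by
    have := (pvMem_heights.mp h).2; omega
  simp [pvA2Step, pvIsIn_label, hmem, pvLabel_ne_lback, pvHeights_succ]

lemma pvA2Step_label_close (d : Nat) (hd : 1 ≤ d) (pdic : PySem.Dict (List Char) Int) :
    pvA2Step (pvHeights d, pdic) (pvLabelN d) = (pvHeights (d - 1), pdic) := by
  have hmem : pvLabelN d ∈ pvHeights d := pvMem_heights.mpr ⟨hd, le_refl d⟩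
  simp [pvA2Step, pvIsIn_label, hmem, pvRemove_heights hd, pvLabel_ne_lback]

lemma pvA2Step_lfront (st : List (List Char) × PySem.Dict (List Char) Int) :
    pvA2Step st pvLFront = st := by
  simp [pvA2Step, pvIsIn_lfront, pvLFront_ne_lback]

lemma pvA2Step_lback (st : List (List Char) × PySem.Dict (List Char) Int) :
    pvA2Step st pvLBack
      = (st.1, st.1.foldl (fun d h => d.modify h 0 (· + 1)) st.2) := by
  simp [pvA2Step, pvIsIn_lback]

lemma pvL2 (d : Nat) (rest : List Char) :
    ∀ (s0 : Int) (pdic : PySem.Dict (List Char) Int), pvND pdic →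
    (∀ p, p <+: rest → 2 * p.count ')' ≤ d + p.length) →
    ((PySem.List.enumerate (pvInfoSpec d rest) s0).foldl (fun st iv => pvA2Step st iv.2)
        (pvHeights d, pdic)).2.values.sum = pdic.values.sum + pvBCount d rest := by
  induction d, rest using pvBCount.induct with
  | case1 d =>
    intro s0 pdic hnd _
    simp [pvInfoSpec, pvBCount, PySem.List.enumerate_nil]
  | case2 d rest ih =>
    intro s0 pdic hnd hbal
    have hd : 1 ≤ d := by
      have := hbal [')'] ⟨rest, rfl⟩
      simp at this
      omega
    rw [pvInfoSpec, if_pos rfl, pvBCount, if_pos rfl,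
      PySem.List.enumerate_cons, List.foldl_cons]
    simp only [pvA2Step_label_close d hd pdic]
    exact ih (s0 + 1) pdic hnd (fun p hp => by
      have h2 := hbal (')' :: p) (List.cons_prefix_cons.mpr ⟨rfl, hp⟩)
      simp at h2
      omega)
  | case3 d c rest hc hpair ih =>
    intro s0 pdic hnd hbal
    obtain ⟨hcp, hhd⟩ := hpair
    obtain ⟨rs, rfl⟩ : ∃ rs, rest = ')' :: rs := by
      cases rest with
      | nil => simp at hhd
      | cons a t =>
        have ha : a = ')' := by simpa using hhd
        exact ⟨t, by rw [ha]⟩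
    subst hcp
    rw [pvInfoSpec, if_neg hc, if_pos ⟨rfl, rfl⟩, pvBCount, if_neg hc, if_pos ⟨rfl, rfl⟩]
    rw [PySem.List.enumerate_cons, List.foldl_cons]
    simp only [pvA2Step_lfront]
    rw [PySem.List.enumerate_cons, List.foldl_cons]
    simp only [pvA2Step_lback]
    obtain ⟨hsum, hnd'⟩ := pvSum_foldl_modify (pvHeights d) pdic hnd
    simp only [List.tail_cons] at ih ⊢
    rw [ih (s0 + 1 + 1) _ hnd' (fun p hp => by
      have h2 := hbal ('(' :: ')' :: p)
        (List.cons_prefix_cons.mpr ⟨rfl, List.cons_prefix_cons.mpr ⟨rfl, hp⟩⟩)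
      simp at h2
      omega), hsum, pvHeights_length]
    ring
  | case4 d c rest hc hpair ih =>
    intro s0 pdic hnd hbal
    rw [pvInfoSpec, if_neg hc, if_neg hpair, pvBCount, if_neg hc, if_neg hpair]
    rw [PySem.List.enumerate_cons, List.foldl_cons]
    simp only [pvA2Step_label_open d pdic]
    obtain ⟨hsum, hnd'⟩ := pvSum_modify pdic (pvLabelN (d + 1)) hnd
    rw [ih (s0 + 1) _ hnd' (fun p hp => by
      have h2 := hbal (c :: p) (List.cons_prefix_cons.mpr ⟨rfl, hp⟩)
      simp [hc] at h2
      omega), hsum]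
    ring


-- ---- phase 1: the first loop produces exactly the info list pvInfoSpec ----
lemma pvSet_append {α : Type} (v t0 : α) : ∀ (done : List α) (tl : List α),
    (done ++ t0 :: tl).set done.length v = done ++ v :: tl := by
  intro done
  induction done with
  | nil => intro tl; rfl
  | cons a l ih => intro tl; simp [List.set_cons_succ, ih]

lemma pvLabel_cast_pred (d : Nat) (hd : 1 ≤ d) :
    pvLabel ((((d - 1 : Nat)) : Int) + 1) = pvLabelN d := by
  rw [pvLabelN]
  congr 1
  omega

lemma pvA1Step_close (arrL : List Char) (s' : List Char) (x : Char) (info : List (List Char))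
    (idx : Int) (c' : Char) (hget : PySem.List.pyGet? arrL (idx - 1) = some c') (hc' : c' ≠ '(') :
    pvA1Step arrL (some (s' ++ [x], info)) (idx, ')')
      = some (s', PySem.List.pySetD info idx (pvLabel ((s'.length : Int) + 1))) := by
  have h1 := PySem.List.pop?_last (s' ++ [x]) ')'
  have h2 := PySem.List.pop?_last s' x
  simp only [pvA1Step, h1, h2, ite_true, hget]
  rw [if_neg (by simpa using hc')]

lemma pvA1Step_laser (arrL : List Char) (stack : List Char) (info : List (List Char))
    (idx : Int) (hget : PySem.List.pyGet? arrL (idx - 1) = some '(') :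
    pvA1Step arrL (some (stack ++ ['('], info)) (idx, ')')
      = some (stack, PySem.List.pySetD (PySem.List.pySetD info (idx - 1) pvLFront) idx pvLBack) := by
  have h1 := PySem.List.pop?_last (stack ++ ['(']) ')'
  have h2 := PySem.List.pop?_last stack '('
  simp only [pvA1Step, h1, h2, ite_true, hget]

lemma pvA1Step_push (arrL : List Char) (stack : List Char) (info : List (List Char))
    (idx : Int) (c : Char) (hc : c ≠ ')') :
    pvA1Step arrL (some (stack, info)) (idx, c)
      = some (stack ++ [c], PySem.List.pySetD info idx (pvLabel ((stack.length : Int) + 1))) := by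
  simp only [pvA1Step, hc, ite_false, List.length_append, List.length_singleton]
  norm_num

lemma pvL1 (arrL : List Char) (d : Nat) (rest : List Char) :
    ∀ (pre stack : List Char) (done tl : List (List Char)),
    arrL = pre ++ rest →
    stack.length = d →
    done.length = pre.length →
    tl.length = rest.length →
    (rest.head? = some ')' → 1 ≤ d → ∃ p c', pre = p ++ [c'] ∧ c' ≠ '(') →
    (∀ p, p <+: rest → 2 * p.count ')' ≤ d + p.length) →
    ∃ stF, (PySem.List.enumerate rest (pre.length : Int)).foldl (pvA1Step arrL)
        (some (stack, done ++ tl))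
      = some (stF, done ++ pvInfoSpec d rest) := by
  induction d, rest using pvBCount.induct with
  | case1 d =>
    intro pre stack done tl _ _ _ htl _ _
    obtain rfl : tl = [] := List.eq_nil_of_length_eq_zero (by simpa using htl)
    exact ⟨stack, by simp [pvInfoSpec, PySem.List.enumerate_nil]⟩
  | case2 d rest ih =>
    intro pre stack done tl harr hst hdone htl hH hbal
    have hd : 1 ≤ d := by
      have := hbal [')'] ⟨rest, rfl⟩
      simp at this
      omega
    obtain ⟨p, c', hpre, hc'⟩ := hH rfl hd
    obtain ⟨s', x, rfl⟩ : ∃ s' x, stack = s' ++ [x] := by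
      rcases stack.eq_nil_or_concat with h | ⟨s', x, h⟩
      · rw [h] at hst; simp at hst; omega
      · exact ⟨s', x, by simpa [List.concat_eq_append] using h⟩
    obtain ⟨t0, tl', rfl⟩ : ∃ t0 tl', tl = t0 :: tl' := by
      cases tl with
      | nil => simp at htl
      | cons a t => exact ⟨a, t, rfl⟩
    rw [← hdone]
    have hget : PySem.List.pyGet? arrL ((done.length : Int) - 1) = some c' := by
      have harr' : arrL = p ++ c' :: (')' :: rest) := by simp [harr, hpre]
      rw [harr', show ((done.length : Int) - 1) = ((p.length : Int)) by
        rw [hdone, hpre]; push_cast [List.length_append, List.length_singleton]; ring]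
      exact PySem.List.pyGet?_append_length p _ c'
    rw [PySem.List.enumerate_cons, List.foldl_cons]
    simp only [pvA1Step_close arrL s' x (done ++ t0 :: tl') ((done.length : Nat) : Int) c' hget hc']
    have hs' : s'.length = d - 1 := by simp at hst; omega
    rw [PySem.List.pySetD_natCast, pvSet_append, hs', pvLabel_cast_pred d hd]
    rw [pvInfoSpec, if_pos rfl]
    have := ih (pre ++ [')']) s' (done ++ [pvLabelN d]) tl'
      (by simp [harr]) (by omega) (by simp [hdone]) (by simpa using htl)
      (fun _ _ => ⟨pre, ')', rfl, by decide⟩)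
      (fun q hq => by
        have h2 := hbal (')' :: q) (List.cons_prefix_cons.mpr ⟨rfl, hq⟩)
        simp at h2
        omega)
    rw [show ((pre ++ [')']).length : Int) = (done.length : Int) + 1 by
      rw [hdone]; push_cast [List.length_append, List.length_singleton]; ring] at this
    simpa [List.append_assoc] using this
  | case3 d c rest hc hpair ih =>
    intro pre stack done tl harr hst hdone htl hH hbal
    obtain ⟨hcp, hhd⟩ := hpair
    obtain ⟨rs, rfl⟩ : ∃ rs, rest = ')' :: rs := by
      cases rest with
      | nil => simp at hhd
      | cons a t =>
        have ha : a = ')' := by simpa using hhd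
        exact ⟨t, by rw [ha]⟩
    subst hcp
    obtain ⟨t0, t1, tl'', rfl⟩ : ∃ t0 t1 tl'', tl = t0 :: t1 :: tl'' := by
      cases tl with
      | nil => simp at htl
      | cons a t =>
        cases t with
        | nil => simp at htl
        | cons b t' => exact ⟨a, b, t', rfl⟩
    rw [← hdone]
    rw [PySem.List.enumerate_cons, List.foldl_cons]
    simp only [pvA1Step_push arrL stack (done ++ t0 :: t1 :: tl'') ((done.length : Nat) : Int) '(' (by decide)]
    rw [PySem.List.pySetD_natCast, pvSet_append]
    rw [PySem.List.enumerate_cons, List.foldl_cons]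
    have hget : PySem.List.pyGet? arrL ((done.length : Int) + 1 - 1) = some '(' := by
      have harr' : arrL = pre ++ '(' :: (')' :: rs) := by simpa using harr
      rw [harr', show ((done.length : Int) + 1 - 1) = ((pre.length : Int)) by rw [hdone]; ring]
      exact PySem.List.pyGet?_append_length pre _ '('
    simp only [pvA1Step_laser arrL stack _ ((done.length : Int) + 1) hget]
    rw [show ((done.length : Int) + 1 - 1) = ((done.length : Nat) : Int) by ring,
      PySem.List.pySetD_natCast]
    rw [show (done ++ pvLabel ((stack.length : Int) + 1) :: t1 :: tl'').set done.length pvLFront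
        = done ++ pvLFront :: t1 :: tl'' from pvSet_append _ _ _ _]
    rw [show ((done.length : Int) + 1) = (((done ++ [pvLFront]).length : Nat) : Int) by
      push_cast [List.length_append, List.length_singleton]; ring,
      PySem.List.pySetD_natCast]
    rw [show done ++ pvLFront :: t1 :: tl'' = (done ++ [pvLFront]) ++ t1 :: tl'' by
        rw [List.append_assoc, List.singleton_append],
      pvSet_append]
    rw [pvInfoSpec, if_neg hc, if_pos ⟨rfl, rfl⟩, List.tail_cons]
    have := ih (pre ++ ['(', ')']) stack (done ++ [pvLFront, pvLBack]) tl''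
      (by simp [harr]) hst (by simp [hdone]) (by simpa using htl)
      (fun _ _ => ⟨pre ++ ['('], ')', by simp, by decide⟩)
      (fun q hq => by
        have h2 := hbal ('(' :: ')' :: q)
          (List.cons_prefix_cons.mpr ⟨rfl, List.cons_prefix_cons.mpr ⟨rfl, hq⟩⟩)
        simp at h2
        omega)
    rw [show ((pre ++ ['(', ')']).length : Int) = (done.length : Int) + 1 + 1 by
      rw [hdone]; push_cast [List.length_append, List.length_cons, List.length_singleton, List.length_nil]; ring] at this
    simpa [List.append_assoc] using this
  | case4 d c rest hc hpair ih =>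
    intro pre stack done tl harr hst hdone htl hH hbal
    obtain ⟨t0, tl', rfl⟩ : ∃ t0 tl', tl = t0 :: tl' := by
      cases tl with
      | nil => simp at htl
      | cons a t => exact ⟨a, t, rfl⟩
    rw [← hdone]
    rw [PySem.List.enumerate_cons, List.foldl_cons]
    simp only [pvA1Step_push arrL stack (done ++ t0 :: tl') ((done.length : Nat) : Int) c hc]
    rw [PySem.List.pySetD_natCast, pvSet_append]
    rw [show pvLabel ((stack.length : Int) + 1) = pvLabelN (d + 1) by
      rw [pvLabelN, hst]; push_cast; ring_nf]
    rw [pvInfoSpec, if_neg hc, if_neg hpair]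
    have := ih (pre ++ [c]) (stack ++ [c]) (done ++ [pvLabelN (d + 1)]) tl'
      (by simp [harr]) (by simp [hst]) (by simp [hdone]) (by simpa using htl)
      (fun hh _ => ⟨pre, c, rfl, fun hcc => hpair ⟨hcc, hh⟩⟩)
      (fun q hq => by
        have h2 := hbal (c :: q) (List.cons_prefix_cons.mpr ⟨rfl, hq⟩)
        simp [hc] at h2
        omega)
    rw [show ((pre ++ [c]).length : Int) = (done.length : Int) + 1 by
      rw [hdone]; push_cast [List.length_append, List.length_singleton]; ring] at this
    simpa [List.append_assoc] using this

-- ---- B's loop computes pvBCount ----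
lemma pvGetD_append (pre ys : List Char) (y : Char) :
    PySem.List.pyGetD (pre ++ y :: ys) ((pre.length : Int)) ' ' = y := by
  rw [PySem.List.pyGetD_natCast, List.getD_append_right pre _ ' ' pre.length (le_refl _)]
  simp

lemma pvL3 (s : List Char) (d : Nat) (rest : List Char) :
    ∀ (pre : List Char) (t : Int),
    s = pre ++ rest →
    (rest.head? = some ')' → 1 ≤ d → ∃ p c', pre = p ++ [c'] ∧ c' ≠ '(') →
    (∀ p, p <+: rest → 2 * p.count ')' ≤ d + p.length) →
    ∃ df, (PySem.List.pyRange (pre.length : Int) (s.length : Int)).foldl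
        (pvBStep s s.length) (t, (d : Int))
      = (t + pvBCount d rest, df) := by
  induction d, rest using pvBCount.induct with
  | case1 d =>
    intro pre t harr _ _
    rw [harr, pvBCount]
    rw [PySem.List.pyRange_one_eq_nil (by simp)]
    exact ⟨(d : Int), by simp⟩
  | case2 d rest ih =>
    intro pre t harr hH hbal
    have hd : 1 ≤ d := by
      have := hbal [')'] ⟨rest, rfl⟩
      simp at this
      omega
    obtain ⟨p, c', hpre, hc'⟩ := hH rfl hd
    have hlt : (pre.length : Int) < (s.length : Int) := by
      rw [harr]; push_cast [List.length_append, List.length_cons]; omega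
    rw [PySem.List.pyRange_one_cons hlt, List.foldl_cons]
    have hcget : PySem.List.pyGetD s ((pre.length : Int)) ' ' = ')' := by
      rw [harr]; exact pvGetD_append pre rest ')'
    have hguard : ¬ (0 < (pre.length : Int) ∧
        PySem.List.pyGetD s ((pre.length : Int) - 1) ' ' = '(') := by
      intro ⟨_, hg⟩
      rw [show s = p ++ c' :: (')' :: rest) by simp [harr, hpre],
        show ((pre.length : Int) - 1) = ((p.length : Int)) by
          rw [hpre]; push_cast [List.length_append, List.length_singleton]; ring,
        pvGetD_append] at hg
      exact hc' hg
    have hstep : pvBStep s s.length (t, (d : Int)) ((pre.length : Int))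
        = (t, ((d - 1 : Nat) : Int)) := by
      simp only [pvBStep, hcget, ite_true]
      rw [if_neg hguard, show ((d - 1 : Nat) : Int) = (d : Int) - 1 by omega]
    simp only [hstep]
    rw [pvBCount, if_pos rfl]
    have := ih (pre ++ [')']) t (by simp [harr])
      (fun _ _ => ⟨pre, ')', rfl, by decide⟩)
      (fun q hq => by
        have h2 := hbal (')' :: q) (List.cons_prefix_cons.mpr ⟨rfl, hq⟩)
        simp at h2
        omega)
    rw [show ((pre ++ [')']).length : Int) = (pre.length : Int) + 1 by
      push_cast [List.length_append, List.length_singleton]; ring] at this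
    exact this
  | case3 d c rest hc hpair ih =>
    intro pre t harr hH hbal
    obtain ⟨hcp, hhd⟩ := hpair
    obtain ⟨rs, rfl⟩ : ∃ rs, rest = ')' :: rs := by
      cases rest with
      | nil => simp at hhd
      | cons a t' =>
        have ha : a = ')' := by simpa using hhd
        exact ⟨t', by rw [ha]⟩
    subst hcp
    have hlt : (pre.length : Int) < (s.length : Int) := by
      rw [harr]; push_cast [List.length_append, List.length_cons]; omega
    have hlt2 : (pre.length : Int) + 1 < (s.length : Int) := by
      rw [harr]; push_cast [List.length_append, List.length_cons]; omega
    rw [PySem.List.pyRange_one_cons hlt, List.foldl_cons]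
    have hcget : PySem.List.pyGetD s ((pre.length : Int)) ' ' = '(' := by
      rw [harr]; exact pvGetD_append pre _ '('
    have hnget : PySem.List.pyGetD s ((pre.length : Int) + 1) ' ' = ')' := by
      rw [show s = (pre ++ ['(']) ++ ')' :: rs by simp [harr],
        show ((pre.length : Int) + 1) = (((pre ++ ['(']).length : Nat) : Int) by
          push_cast [List.length_append, List.length_singleton]; ring]
      exact pvGetD_append _ _ ')'
    have hstep1 : pvBStep s s.length (t, (d : Int)) ((pre.length : Int))
        = (t, (d : Int) + 1) := by
      simp [pvBStep, hcget, hnget, hlt2]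
    have hstep2 : pvBStep s s.length (t, (d : Int) + 1) ((pre.length : Int) + 1)
        = (t + (d : Int), (d : Int)) := by
      have hpget : PySem.List.pyGetD s ((pre.length : Int) + 1 - 1) ' ' = '(' := by
        rw [show ((pre.length : Int) + 1 - 1) = ((pre.length : Int)) by ring]
        exact hcget
      have hpos : (0 : Int) < (pre.length : Int) + 1 := by positivity
      simp only [pvBStep, hnget, ite_true]
      rw [if_pos ⟨hpos, hpget⟩, Prod.mk.injEq]
      constructor <;> ring
    simp only [hstep1]
    rw [PySem.List.pyRange_one_cons hlt2, List.foldl_cons]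
    simp only [hstep2]
    rw [pvBCount, if_neg hc, if_pos ⟨rfl, rfl⟩, List.tail_cons]
    simp only [List.tail_cons] at ih
    obtain ⟨df, hdf⟩ := ih (pre ++ ['(', ')']) (t + (d : Int)) (by simp [harr])
      (fun _ _ => ⟨pre ++ ['('], ')', by simp, by decide⟩)
      (fun q hq => by
        have h2 := hbal ('(' :: ')' :: q)
          (List.cons_prefix_cons.mpr ⟨rfl, List.cons_prefix_cons.mpr ⟨rfl, hq⟩⟩)
        simp at h2
        omega)
    rw [show ((pre ++ ['(', ')']).length : Int) = (pre.length : Int) + 1 + 1 by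
      push_cast [List.length_append, List.length_cons, List.length_singleton, List.length_nil]
      ring] at hdf
    exact ⟨df, by rw [hdf]; rw [add_assoc]⟩
  | case4 d c rest hc hpair ih =>
    intro pre t harr hH hbal
    have hlt : (pre.length : Int) < (s.length : Int) := by
      rw [harr]; push_cast [List.length_append, List.length_cons]; omega
    rw [PySem.List.pyRange_one_cons hlt, List.foldl_cons]
    have hcget : PySem.List.pyGetD s ((pre.length : Int)) ' ' = c := by
      rw [harr]; exact pvGetD_append pre rest c
    have hguard : ¬ (c = '(' ∧ (pre.length : Int) + 1 < (s.length : Int) ∧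
        PySem.List.pyGetD s ((pre.length : Int) + 1) ' ' = ')') := by
      intro ⟨hcc, hlen, hg⟩
      apply hpair
      refine ⟨hcc, ?_⟩
      cases hrest : rest with
      | nil =>
        rw [harr, hrest] at hlen
        push_cast [List.length_append, List.length_cons, List.length_nil] at hlen
        omega
      | cons a t' =>
        rw [show s = (pre ++ [c]) ++ a :: t' by simp [harr, hrest],
          show ((pre.length : Int) + 1) = (((pre ++ [c]).length : Nat) : Int) by
            push_cast [List.length_append, List.length_singleton]; ring,
          pvGetD_append] at hg
        simp [hg]
    have hstep : pvBStep s s.length (t, (d : Int)) ((pre.length : Int))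
        = (t + 1, ((d + 1 : Nat) : Int)) := by
      simp only [pvBStep, hcget, hc, ite_false]
      rw [if_neg hguard, show ((d + 1 : Nat) : Int) = (d : Int) + 1 by omega]
    simp only [hstep]
    rw [pvBCount, if_neg hc, if_neg hpair]
    obtain ⟨df, hdf⟩ := ih (pre ++ [c]) (t + 1) (by simp [harr])
      (fun hh _ => ⟨pre, c, rfl, fun hcc => hpair ⟨hcc, hh⟩⟩)
      (fun q hq => by
        have h2 := hbal (c :: q) (List.cons_prefix_cons.mpr ⟨rfl, hq⟩)
        simp [hc] at h2
        omega)
    rw [show ((pre ++ [c]).length : Int) = (pre.length : Int) + 1 by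
      push_cast [List.length_append, List.length_singleton]; ring] at hdf
    exact ⟨df, by rw [hdf]; rw [Prod.mk.injEq]; constructor <;> [omega; rfl]⟩

-- ---- initial dict: all values are zero ----
lemma pvInsert_zero (d : PySem.Dict (List Char) Int) (k : List Char)
    (h : ∀ v ∈ d.values, v = 0) : ∀ v ∈ (d.insert k (0 : Int)).values, v = 0 := by
  intro v hv
  by_cases hc : d.contains k = true
  · rw [PySem.Dict.values, PySem.Dict.items_insert_of_contains d 0 hc, List.map_map] at hv
    obtain ⟨p, hp, hpv⟩ := List.mem_map.mp hv
    by_cases hpk : p.1 = k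
    · rw [← hpv]
      simp [hpk]
    · rw [← hpv]
      simp only [Function.comp]
      rw [if_neg (by simpa using hpk)]
      exact h p.2 (List.mem_map.mpr ⟨p, hp, rfl⟩)
  · rw [PySem.Dict.values,
      PySem.Dict.items_insert_of_not_contains d 0 (by simpa using hc)] at hv
    rw [List.map_append] at hv
    rcases List.mem_append.mp hv with hv | hv
    · exact h v hv
    · simpa using hv

lemma pvUpdate_zero : ∀ (ps : List (List Char × Int)) (d0 : PySem.Dict (List Char) Int),
    (∀ pr ∈ ps, pr.2 = 0) → (∀ v ∈ d0.values, v = 0) →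
    ∀ v ∈ (d0.update ps).values, v = 0 := by
  intro ps
  induction ps with
  | nil => intro d0 _ h0; simpa [PySem.Dict.update] using h0
  | cons p tl ih =>
    intro d0 hps h0
    have hp2 : p.2 = 0 := hps p List.mem_cons_self
    have : d0.update (p :: tl) = (d0.insert p.1 p.2).update tl := by
      simp [PySem.Dict.update]
    rw [this]
    exact ih _ (fun q hq => hps q (List.mem_cons_of_mem _ hq))
      (hp2 ▸ pvInsert_zero d0 p.1 h0)

lemma pvOfList_zero_sum (xs : List (List Char)) :
    (PySem.Dict.ofList (xs.map (fun h => (h, (0 : Int))))).values.sum = 0 := by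
  apply List.sum_eq_zero
  intro v hv
  exact pvUpdate_zero (xs.map (fun h => (h, (0 : Int)))) PySem.Dict.empty
    (by intro pr hpr; obtain ⟨a, _, rfl⟩ := List.mem_map.mp hpr; rfl)
    (by intro v hv; simp [PySem.Dict.values, PySem.Dict.empty] at hv) v hv

-- ===== VERDICT (by name: the statement is the Claim_ definition above) =====
theorem solution_1st_spec : Claim_equal_solution_1st := by
  unfold Claim_equal_solution_1st Spec_solution_1st
  intro arr _ hpre
  have hbal : ∀ p, p <+: arr.toList → 2 * p.count ')' ≤ 0 + p.length := by
    intro p hp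
    have hle : p.length ≤ arr.toList.length := hp.length_le
    have h2 := hpre p.length hle
    rw [← (List.prefix_iff_eq_take.mp hp)] at h2
    omega
  have hH0 : ∀ (h : (arr.toList).head? = some ')'), 1 ≤ 0 →
      ∃ p c', ([] : List Char) = p ++ [c'] ∧ c' ≠ '(' :=
    fun _ h1 => absurd h1 (by omega)
  obtain ⟨stF, hfold⟩ := pvL1 arr.toList 0 arr.toList [] [] []
    (List.replicate arr.toList.length ([] : List Char))
    (by simp) rfl rfl (by simp) hH0 hbal
  simp only [List.nil_append, List.length_nil, Nat.cast_zero] at hfold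
  obtain ⟨df, hB⟩ := pvL3 arr.toList 0 arr.toList [] 0 (by simp)
    (fun _ h1 => absurd h1 (by omega)) hbal
  simp only [List.length_nil, Nat.cast_zero] at hB
  have hnd0 : pvND (PySem.Dict.ofList
      ((((PySem.Set.ofList (pvInfoSpec 0 arr.toList)).filter
        (fun h => PySem.Chars.isIn pvHeightCs h)).map (fun h => (h, (0 : Int)))))) := by
    have := PySem.Dict.nodup_keys_ofList (κ := List Char) (ν := Int)
      ((((PySem.Set.ofList (pvInfoSpec 0 arr.toList)).filter
        (fun h => PySem.Chars.isIn pvHeightCs h)).map (fun h => (h, (0 : Int)))))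
    simpa [PySem.Dict.keys, pvND] using this
  have hL2 := pvL2 0 arr.toList 0 _ hnd0 hbal
  rw [pvOfList_zero_sum] at hL2
  simp only [pvHeights, List.range_zero, List.map_nil] at hL2
  rw [solution_1st, solution_1st_alt]
  rw [hfold]
  rw [hB]
  simp only [hL2]
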